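-- pv_equiv track=rewrite | github.com/AndreiPiterbarg/compact_sidon | tests/test_cheby_basis_a.py | enum_monos
-- ===== SOURCE A (Python) =====
-- def enum_monos(d: int, max_deg: int):
--     out = []
--     if d == 1:
--         for a in range(max_deg + 1):
--             out.append((a,))
--         return out
--
--     def rec(depth, prefix, rem):
--         if depth == d - 1:
--             for k in range(rem + 1):
--                 out.append(tuple(prefix + [k]))
--             return
--         for k in range(rem + 1):
--             rec(depth + 1, prefix + [k], rem - k)
--
--     rec(0, [], max_deg)
--     return out
-- ===== SOURCE B (Python) =====
-- def enum_monos(d: int, max_deg: int):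
--     tuples = [()]
--     i = 0
--     while i < d and tuples:
--         tuples = [t + (k,) for t in tuples for k in range(max_deg + 1 - sum(t))]
--         i += 1
--     return tuples
-- ===== Notes on version B (the rewrite author's own statement) =====
-- stated objective: simpler
-- what changed: A's pruned DFS recursion with an explicit prefix and a special d==1 branch is replaced by an iterative level-wise rebuild: starting from [()], each loop pass extends every partial tuple by each feasible last coordinate in one comprehension, stopping early when no tuples remain.
-- outside the precondition, e.g. on enum_monos(0, -1): A returns [], B returns [()]
import Mathlib
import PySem

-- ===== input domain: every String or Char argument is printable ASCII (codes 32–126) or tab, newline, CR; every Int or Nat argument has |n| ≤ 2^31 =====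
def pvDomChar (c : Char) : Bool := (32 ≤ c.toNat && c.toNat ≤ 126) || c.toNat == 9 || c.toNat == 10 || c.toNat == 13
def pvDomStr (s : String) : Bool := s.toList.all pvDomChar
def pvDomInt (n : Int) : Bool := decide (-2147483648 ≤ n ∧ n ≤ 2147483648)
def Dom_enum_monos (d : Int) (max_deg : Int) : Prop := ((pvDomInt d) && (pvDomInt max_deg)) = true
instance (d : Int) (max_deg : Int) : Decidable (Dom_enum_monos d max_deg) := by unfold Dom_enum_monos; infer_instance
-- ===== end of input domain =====

-- B replaces A's pruned DFS recursion over prefixes by an iterative level-wise (BFS)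
-- rebuild of the tuple list, one variable per pass; alternative decomposition, same output.

-- ===== PORT A =====
-- rec(depth, prefix, rem); fuel = d - 1 - depth, so fuel = 0 is A's 'depth == d - 1' branch
def pvRecA (fuel : Nat) (pre : List Int) (rem : Int) (out : List (List Int)) : List (List Int) :=
  match fuel with
  | 0 => (PySem.List.pyRange 0 (rem + 1) 1).foldl (fun acc k => acc ++ [pre ++ [k]]) out
  | f + 1 => (PySem.List.pyRange 0 (rem + 1) 1).foldl (fun acc k => pvRecA f (pre ++ [k]) (rem - k) acc) out

def enum_monos (d : Int) (max_deg : Int) : List (List Int) :=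
  if d = 1 then (PySem.List.pyRange 0 (max_deg + 1) 1).foldl (fun acc a => acc ++ [[a]]) []
  else pvRecA (d - 1).toNat [] max_deg []

-- ===== PORT B =====
-- one pass of '[t + (k,) for t in tuples for k in range(max_deg + 1 - sum(t))]'
def pvLevel (max_deg : Int) (ts : List (List Int)) : List (List Int) :=
  ts.flatMap (fun t => (PySem.List.pyRange 0 (max_deg + 1 - t.sum) 1).map (fun k => t ++ [k]))

-- 'while i < d and tuples:'; the remaining iteration count d - i is the fuel
def pvLoop (max_deg : Int) (fuel : Nat) (ts : List (List Int)) : List (List Int) :=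
  match fuel, ts with
  | 0, ts => ts
  | _ + 1, [] => []
  | f + 1, t :: ts => pvLoop max_deg f (pvLevel max_deg (t :: ts))

def enum_monos_alt (d : Int) (max_deg : Int) : List (List Int) :=
  pvLoop max_deg d.toNat [[]]

-- ===== PRECONDITION & SPEC =====
-- Pre_ excludes nonpositive d: for d ≤ 0 with max_deg ≥ 0 A's recursion never reaches
-- depth == d - 1 and raises RecursionError, and for d ≤ 0 with max_deg < 0 A's accidental []
-- and B's [()] (the empty product) are both defensible answers for a degenerate variable count.
def Pre_enum_monos (d : Int) (max_deg : Int) : Prop := 1 ≤ d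
instance (d : Int) (max_deg : Int) : Decidable (Pre_enum_monos d max_deg) := by unfold Pre_enum_monos; infer_instance
def pvWitness_enum_monos : Int × Int := (2, 3)

def Spec_enum_monos (d : Int) (max_deg : Int) (out : List (List Int)) : Prop := out = enum_monos_alt d max_deg
instance (d : Int) (max_deg : Int) (out : List (List Int)) : Decidable (Spec_enum_monos d max_deg out) := by unfold Spec_enum_monos; infer_instance

-- ===== CLAIM (what is proved, stated in full; the proofs are below) =====
def Claim_equal_enum_monos : Prop := ∀ (d : Int) (max_deg : Int), Dom_enum_monos d max_deg → Pre_enum_monos d max_deg → Spec_enum_monos d max_deg (enum_monos d max_deg)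

-- ===== LEMMAS AND PROOFS =====

-- canonical head-first description: tuples of n nonnegative entries with sum ≤ rem, lex order
def pvCanon (rem : Int) : Nat → List (List Int)
  | 0 => [[]]
  | n + 1 => (PySem.List.pyRange 0 (rem + 1) 1).flatMap (fun k => (pvCanon (rem - k) n).map (fun t => k :: t))

-- A's DFS accumulates exactly the canonical list, prefixed
lemma pvRecA_eq (n : Nat) : ∀ (rem : Int) (pre : List Int) (out : List (List Int)),
    pvRecA n pre rem out = out ++ (pvCanon rem (n + 1)).map (fun t => pre ++ t) := by
  induction n with
  | zero =>
    intro rem pre out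
    show (PySem.List.pyRange 0 (rem + 1) 1).foldl (fun acc k => acc ++ [pre ++ [k]]) out = _
    rw [PySem.List.foldl_append_singleton_eq_map (fun k => pre ++ [k])]
    congr 1
    show _ = ((PySem.List.pyRange 0 (rem + 1) 1).flatMap
      (fun k => (pvCanon (rem - k) 0).map (fun t => k :: t))).map (fun t => pre ++ t)
    simp only [pvCanon, List.map_flatMap, List.map_map]
    exact List.map_eq_flatMap
  | succ n ih =>
    intro rem pre out
    show (PySem.List.pyRange 0 (rem + 1) 1).foldl
        (fun acc k => pvRecA n (pre ++ [k]) (rem - k) acc) out = _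
    rw [PySem.List.foldl_congr_mem _ _
      (fun acc k => acc ++ (pvCanon (rem - k) (n + 1)).map (fun t => (pre ++ [k]) ++ t)) out
      (fun acc x _ => ih (rem - x) (pre ++ [x]) acc)]
    rw [PySem.List.foldl_append_eq_flatMap]
    congr 1
    show _ = ((PySem.List.pyRange 0 (rem + 1) 1).flatMap
      (fun k => (pvCanon (rem - k) (n + 1)).map (fun t => k :: t))).map (fun t => pre ++ t)
    rw [List.map_flatMap]
    apply List.flatMap_congr
    intro k _
    rw [List.map_map]
    apply List.map_congr_left
    intro t _
    simp

-- the canonical list can equally be built by extending every tuple at its END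
lemma pvCanon_snoc (n : Nat) : ∀ (rem : Int),
    pvCanon rem (n + 1) = (pvCanon rem n).flatMap
      (fun t => (PySem.List.pyRange 0 (rem - t.sum + 1) 1).map (fun k => t ++ [k])) := by
  induction n with
  | zero =>
    intro rem
    show (PySem.List.pyRange 0 (rem + 1) 1).flatMap
        (fun k => (pvCanon (rem - k) 0).map (fun t => k :: t)) = _
    simp [pvCanon, List.map_eq_flatMap]
  | succ n ih =>
    intro rem
    have hL : pvCanon rem (n + 1 + 1) = (PySem.List.pyRange 0 (rem + 1) 1).flatMap
        (fun k => (pvCanon (rem - k) (n + 1)).map (fun t => k :: t)) := rfl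
    have hR : pvCanon rem (n + 1) = (PySem.List.pyRange 0 (rem + 1) 1).flatMap
        (fun k => (pvCanon (rem - k) n).map (fun t => k :: t)) := rfl
    rw [hL]
    conv_rhs => rw [hR]
    rw [List.flatMap_assoc]
    apply List.flatMap_congr
    intro k _
    rw [ih (rem - k), List.map_flatMap, List.flatMap_map]
    apply List.flatMap_congr
    intro t _
    rw [List.map_map]
    have hb : rem - k - t.sum + 1 = rem - (k :: t).sum + 1 := by simp; ring
    rw [hb]
    apply List.map_congr_left
    intro j _
    simp

-- B's pass-by-pass rebuild reaches the same canonical list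
lemma pvLevel_iter (M : Int) (j : Nat) : (pvLevel M)^[j] [[]] = pvCanon M j := by
  induction j with
  | zero => rfl
  | succ j ih =>
    rw [Function.iterate_succ_apply', ih, pvCanon_snoc j M]
    show (pvCanon M j).flatMap
        (fun t => (PySem.List.pyRange 0 (M + 1 - t.sum) 1).map (fun k => t ++ [k])) = _
    apply List.flatMap_congr
    intro t _
    rw [show M + 1 - t.sum = M - t.sum + 1 from by ring]

lemma pvLoop_iterate (M : Int) (f : Nat) : ∀ (ts : List (List Int)),
    pvLoop M f ts = (pvLevel M)^[f] ts := by
  induction f with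
  | zero => intro ts; rfl
  | succ f ih =>
    intro ts
    match ts with
    | [] =>
      show ([] : List (List Int)) = _
      rw [Function.iterate_fixed (f := pvLevel M) rfl]
    | t :: ts =>
      show pvLoop M f (pvLevel M (t :: ts)) = _
      rw [ih, Function.iterate_succ_apply]

-- ===== VERDICT (by name: the statement is the Claim_ definition above) =====
theorem enum_monos_spec : Claim_equal_enum_monos := by
  intro d m _ hpre
  unfold Spec_enum_monos enum_monos enum_monos_alt
  unfold Pre_enum_monos at hpre
  have hA : (if d = 1 then (PySem.List.pyRange 0 (m + 1) 1).foldl (fun acc a => acc ++ [[a]]) []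
      else pvRecA (d - 1).toNat [] m []) = pvRecA (d - 1).toNat [] m [] := by
    split_ifs with hd
    · subst hd; rfl
    · rfl
  rw [hA, pvRecA_eq ((d - 1).toNat) m [] [], pvLoop_iterate m d.toNat [[]],
    pvLevel_iter m d.toNat, show (d - 1).toNat + 1 = d.toNat from by omega]
  simp
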